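-- pv_equiv track=rewrite | github.com/uyitroa/differential-cryptanalysis | one_round_diff.py | get_charac_data
-- ===== SOURCE A (Python) =====
-- sbox = [3, 14, 1, 10, 4, 9, 5, 6, 8, 11, 15, 2, 13, 12, 0, 7]
--
-- size = 2**4
--
-- def get_charac_data(d_input, d_output):
-- 	in_char = []
-- 	out_char = []
-- 	for i in range(size):
-- 		j = i ^ d_input
-- 		if sbox[i] ^ sbox[j] == d_output:
-- 			in_char.append((i, j))
-- 			out_char.append((sbox[i], sbox[j]))
--
-- 	return in_char, out_char
-- ===== SOURCE B (Python) =====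
-- sbox = [3, 14, 1, 10, 4, 9, 5, 6, 8, 11, 15, 2, 13, 12, 0, 7]
--
-- size = 2**4
--
-- def get_charac_data(d_input, d_output):
-- 	# Recursive back-to-front construction: go(i) returns the characteristic
-- 	# data for indices i..size-1, prepending a match in front of the tail's
-- 	# result, so no accumulator lists are threaded through the scan.
-- 	def go(i):
-- 		if i == size:
-- 			return [], []
-- 		j = i ^ d_input
-- 		rest_in, rest_out = go(i + 1)
-- 		if sbox[i] ^ sbox[j] == d_output:
-- 			return [(i, j)] + rest_in, [(sbox[i], sbox[j])] + rest_out
-- 		return rest_in, rest_out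
-- 	return go(0)
-- ===== Notes on version B (the rewrite author's own statement) =====
-- stated objective: alternative
-- what changed: B replaces A's forward loop that appends to two accumulator lists by a recursion from each index to the end of the sbox that prepends a matching pair in front of the tail's result (iterative accumulation vs back-to-front structural recursion).
import Mathlib
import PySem

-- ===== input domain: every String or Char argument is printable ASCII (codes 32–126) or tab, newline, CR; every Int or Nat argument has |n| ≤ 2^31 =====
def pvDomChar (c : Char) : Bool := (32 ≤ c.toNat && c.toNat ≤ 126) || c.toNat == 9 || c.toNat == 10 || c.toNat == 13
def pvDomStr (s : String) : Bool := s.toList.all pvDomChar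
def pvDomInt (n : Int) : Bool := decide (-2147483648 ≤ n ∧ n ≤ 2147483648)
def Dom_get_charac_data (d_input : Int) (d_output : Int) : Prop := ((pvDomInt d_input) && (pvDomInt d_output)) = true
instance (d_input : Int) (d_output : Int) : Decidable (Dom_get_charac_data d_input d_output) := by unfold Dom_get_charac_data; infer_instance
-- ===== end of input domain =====

-- B replaces A's forward loop appending to two accumulators by a back-to-front
-- recursion that prepends each match to the tail's result (objective:
-- alternative decomposition, same cost).

-- the module constant sbox (shared context of both versions)
def pvSbox : List Int := [3, 14, 1, 10, 4, 9, 5, 6, 8, 11, 15, 2, 13, 12, 0, 7]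

-- sbox[j] with Python's negative-index wraparound; the .getD 0 arm is unreachable
-- under Pre_ (outside it Python raises IndexError)
def pvSboxAt (j : Int) : Int := (PySem.List.pyGet? pvSbox j).getD 0

-- ===== PORT A =====
def get_charac_data (d_input : Int) (d_output : Int) : (List (Int × Int)) × (List (Int × Int)) :=
  (PySem.List.pyRange 0 16 1).foldl
    (fun st i =>
      let j := PySem.Int.bxor i d_input
      if PySem.Int.bxor (pvSboxAt i) (pvSboxAt j) == d_output then
        (st.1 ++ [(i, j)], st.2 ++ [(pvSboxAt i, pvSboxAt j)])
      else st)
    ([], [])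

-- ===== PORT B =====
-- the inner recursive helper go(i) of Source B, recursing from i up to size = 16
def pvGo (d_input : Int) (d_output : Int) (i : Nat) : (List (Int × Int)) × (List (Int × Int)) :=
  if h : i < 16 then
    let j := PySem.Int.bxor (Int.ofNat i) d_input
    let rest := pvGo d_input d_output (i + 1)
    if PySem.Int.bxor (pvSboxAt (Int.ofNat i)) (pvSboxAt j) == d_output then
      ((Int.ofNat i, j) :: rest.1, (pvSboxAt (Int.ofNat i), pvSboxAt j) :: rest.2)
    else rest
  else ([], [])
termination_by 16 - i

def get_charac_data_alt (d_input : Int) (d_output : Int) : (List (Int × Int)) × (List (Int × Int)) :=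
  pvGo d_input d_output 0

-- ===== PRECONDITION & SPEC =====
-- Pre_ excludes exactly the inputs on which Python A raises IndexError
-- (some i in range(16) has i ^ d_input outside [-16, 15]); A returns normally
-- iff -16 ≤ d_input ≤ 15.
def Pre_get_charac_data (d_input : Int) (d_output : Int) : Prop := -16 ≤ d_input ∧ d_input ≤ 15
instance (d_input : Int) (d_output : Int) : Decidable (Pre_get_charac_data d_input d_output) := by unfold Pre_get_charac_data; infer_instance
def pvWitness_get_charac_data : Int × Int := (3, 5)

def Spec_get_charac_data (d_input : Int) (d_output : Int) (out : (List (Int × Int)) × (List (Int × Int))) : Prop := out = get_charac_data_alt d_input d_output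
instance (d_input : Int) (d_output : Int) (out : (List (Int × Int)) × (List (Int × Int))) : Decidable (Spec_get_charac_data d_input d_output out) := by unfold Spec_get_charac_data; infer_instance

-- ===== CLAIM (what is proved, stated in full; the proofs are below) =====
def Claim_equal_get_charac_data : Prop := ∀ (d_input : Int) (d_output : Int), Dom_get_charac_data d_input d_output → Pre_get_charac_data d_input d_output → Spec_get_charac_data d_input d_output (get_charac_data d_input d_output)

-- ===== LEMMAS AND PROOFS =====

-- A's loop: conditional append-to-both-lists fold = filter-then-map
theorem pv_a_fold (cond : Int → Bool) (f g : Int → Int × Int) :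
    ∀ (L : List Int) (st : (List (Int × Int)) × (List (Int × Int))),
      L.foldl (fun st i => if cond i then (st.1 ++ [f i], st.2 ++ [g i]) else st) st
        = (st.1 ++ (L.filter cond).map f, st.2 ++ (L.filter cond).map g) := by
  intro L
  induction L with
  | nil => intro st; simp
  | cons a L ih =>
      intro st
      by_cases h : cond a
      · simp [List.foldl_cons, h, ih]
      · simp [List.foldl_cons, h, ih]

-- B's recursion computes the filter-then-map of the remaining index range
theorem pv_go_eq (d_input d_output : Int) :
    ∀ (n k : Nat), k + n = 16 →
      pvGo d_input d_output k
        = ((((List.range' k n).map Int.ofNat).filter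
              (fun i => PySem.Int.bxor (pvSboxAt i) (pvSboxAt (PySem.Int.bxor i d_input)) == d_output)).map
              (fun i => (i, PySem.Int.bxor i d_input)),
           (((List.range' k n).map Int.ofNat).filter
              (fun i => PySem.Int.bxor (pvSboxAt i) (pvSboxAt (PySem.Int.bxor i d_input)) == d_output)).map
              (fun i => (pvSboxAt i, pvSboxAt (PySem.Int.bxor i d_input)))) := by
  intro n
  induction n with
  | zero =>
      intro k hk
      rw [pvGo]
      simp [show ¬ k < 16 by omega]
  | succ n ih =>
      intro k hk
      rw [pvGo]
      rw [dif_pos (by omega : k < 16)]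
      rw [ih (k + 1) (by omega)]
      simp only [List.range'_succ, List.map_cons, List.filter_cons, beq_iff_eq]
      split_ifs with h <;> simp

-- the concrete index list of A's range(16), as B's List.range'
theorem pv_range_16 : PySem.List.pyRange 0 16 1 = (List.range' 0 16).map Int.ofNat := by decide

-- ===== VERDICT (by name: the statement is the Claim_ definition above) =====
theorem get_charac_data_spec : Claim_equal_get_charac_data := by
  intro d_input d_output _ _
  unfold Spec_get_charac_data get_charac_data get_charac_data_alt
  rw [pv_range_16,
      pv_a_fold (fun i => PySem.Int.bxor (pvSboxAt i) (pvSboxAt (PySem.Int.bxor i d_input)) == d_output)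
        (fun i => (i, PySem.Int.bxor i d_input))
        (fun i => (pvSboxAt i, pvSboxAt (PySem.Int.bxor i d_input))),
      pv_go_eq d_input d_output 16 0 rfl]
  simp
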